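-- pv_equiv track=rewrite | github.com/MolfarUA/CodeWars_Solutions | 6 kyu/Kingdoms Ep1: Jousting/solution.py | joust
-- ===== SOURCE A (Python) =====
-- def joust(list_field: tuple, v_knight_left: int, v_knight_right: int) -> tuple:
--     if v_knight_left == 0 and v_knight_right == 0:
--         return list_field
--
--     len1, len2 = len(list_field[0]), len(list_field[1])
--     left_point, right_point = 2, len1 - 3
--
--     while left_point < right_point:
--         left_point += v_knight_left
--         right_point -= v_knight_right
--
--     return (" " * (left_point - 2) + "$->" + " " * (len1 - left_point -1),
--            " " * right_point + "<-P" + " " * (len2 - right_point - 3))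
-- ===== SOURCE B (Python) =====
-- def _lane(pre: int, rider: str, post: int) -> str:
--     return " " * pre + rider + " " * post
--
--
-- def joust(list_field: tuple, v_knight_left: int, v_knight_right: int) -> tuple:
--     if v_knight_left == 0 == v_knight_right:
--         return list_field
--
--     closing = v_knight_left + v_knight_right
--     width_l = len(list_field[0])
--     width_r = len(list_field[1])
--     gap = width_l - 5
--     # closed-form step count: smallest n >= 0 with n*closing >= gap (ceiling division)
--     steps = -(-gap // closing) if gap > 0 else 0
--     lp = 2 + steps * v_knight_left
--     rp = width_l - 3 - steps * v_knight_right
--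
--     return (_lane(lp - 2, "$->", width_l - lp - 1),
--             _lane(rp, "<-P", width_r - rp - 3))
-- ===== Notes on version B (the rewrite author's own statement) =====
-- stated objective: alternative
-- what changed: The while loop that moves the two jousting points step by step is replaced by a closed-form step count (one ceiling division), from which the final positions are computed directly; building the output strings still dominates the runtime, so the overall cost is unchanged.
import Mathlib
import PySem

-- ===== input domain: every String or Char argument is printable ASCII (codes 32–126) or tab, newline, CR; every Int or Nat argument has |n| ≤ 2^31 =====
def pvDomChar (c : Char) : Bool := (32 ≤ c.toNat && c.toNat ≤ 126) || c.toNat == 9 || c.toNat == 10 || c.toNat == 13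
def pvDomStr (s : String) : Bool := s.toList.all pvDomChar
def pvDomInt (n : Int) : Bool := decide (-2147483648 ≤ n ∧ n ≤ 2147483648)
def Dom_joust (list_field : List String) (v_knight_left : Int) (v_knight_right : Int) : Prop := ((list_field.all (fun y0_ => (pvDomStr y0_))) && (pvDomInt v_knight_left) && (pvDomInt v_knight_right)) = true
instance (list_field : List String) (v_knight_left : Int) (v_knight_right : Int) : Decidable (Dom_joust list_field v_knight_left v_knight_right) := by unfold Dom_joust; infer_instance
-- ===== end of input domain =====

-- B computes the final knight positions with one closed-form ceiling division instead of A's step-by-step while loop; building the output strings still dominates, so the overall cost is similar.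

-- ===== PORT A =====
-- " " * n  (empty for n ≤ 0, exactly as in Python)
def pySpaces (n : Int) : List Char := List.replicate n.toNat ' '

-- the two result strings of A's final `return`
def joustRender (left_point right_point len1 len2 : Int) : List String :=
  [ String.ofList (pySpaces (left_point - 2) ++ ['$', '-', '>'] ++ pySpaces (len1 - left_point - 1)),
    String.ofList (pySpaces right_point ++ ['<', '-', 'P'] ++ pySpaces (len2 - right_point - 3)) ]

-- A's while loop.  The extra conjunct `0 < vl + vr` only makes the loop total in Lean:
-- on every input admitted by Pre_joust on which the loop body runs at all, it holds, so behaviour is unchanged there.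
def joustLoop (left_point right_point v_knight_left v_knight_right : Int) : Int × Int :=
  if _h : left_point < right_point ∧ 0 < v_knight_left + v_knight_right then
    joustLoop (left_point + v_knight_left) (right_point - v_knight_right) v_knight_left v_knight_right
  else (left_point, right_point)
termination_by (right_point - left_point).toNat
decreasing_by omega

def joust (list_field : List String) (v_knight_left : Int) (v_knight_right : Int) : List String :=
  if v_knight_left = 0 ∧ v_knight_right = 0 then list_field
  else
    match PySem.List.pyGet? list_field 0, PySem.List.pyGet? list_field 1 with
    | some s0, some s1 =>
        let len1 := PySem.Str.len s0
        let len2 := PySem.Str.len s1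
        let p := joustLoop 2 (len1 - 3) v_knight_left v_knight_right
        joustRender p.1 p.2 len1 len2
    | _, _ => []  -- Python raises IndexError here; excluded by Pre_joust

-- ===== PORT B =====
-- B's helper `_lane(pre, rider, post)`
def joustLane (pre : Int) (rider : List Char) (post : Int) : String :=
  String.ofList (List.replicate pre.toNat ' ' ++ rider ++ List.replicate post.toNat ' ')

def joust_alt (list_field : List String) (v_knight_left : Int) (v_knight_right : Int) : List String :=
  if v_knight_left = 0 ∧ v_knight_right = 0 then list_field
  else
    match PySem.List.pyGet? list_field 0 with
    | none => []  -- Python raises IndexError here; excluded by Pre_joust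
    | some s0 =>
      match PySem.List.pyGet? list_field 1 with
      | none => []  -- Python raises IndexError here; excluded by Pre_joust
      | some s1 =>
        let closing := v_knight_left + v_knight_right
        let width_l := PySem.Str.len s0
        let width_r := PySem.Str.len s1
        let gap := width_l - 5
        let steps := if 0 < gap then -(PySem.Int.floordiv (-gap) closing) else 0
        let lp := 2 + steps * v_knight_left
        let rp := width_l - 3 - steps * v_knight_right
        [joustLane (lp - 2) ['$', '-', '>'] (width_l - lp - 1),
         joustLane rp ['<', '-', 'P'] (width_r - rp - 3)]

-- ===== PRECONDITION & SPEC =====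
-- Pre_ excludes exactly the inputs where A does not return: fewer than two strings with a nonzero
-- velocity pair (IndexError on list_field[1]), and a positive initial gap with nonpositive closing
-- speed (the while loop never terminates).
def Pre_joust (list_field : List String) (v_knight_left : Int) (v_knight_right : Int) : Prop :=
  (v_knight_left = 0 ∧ v_knight_right = 0) ∨
    (2 ≤ list_field.length ∧
      (PySem.Str.len (list_field.headD "") - 5 ≤ 0 ∨ 0 < v_knight_left + v_knight_right))
instance (list_field : List String) (v_knight_left : Int) (v_knight_right : Int) : Decidable (Pre_joust list_field v_knight_left v_knight_right) := by unfold Pre_joust; infer_instance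

def pvWitness_joust : List String × Int × Int := (["  $->   <-P  ", "  $->   <-P  "], 1, 2)

def Spec_joust (list_field : List String) (v_knight_left : Int) (v_knight_right : Int) (out : List String) : Prop := out = joust_alt list_field v_knight_left v_knight_right
instance (list_field : List String) (v_knight_left : Int) (v_knight_right : Int) (out : List String) : Decidable (Spec_joust list_field v_knight_left v_knight_right out) := by unfold Spec_joust; infer_instance

-- ===== CLAIM (what is proved, stated in full; the proofs are below) =====
def Claim_equal_joust : Prop := ∀ (list_field : List String) (v_knight_left : Int) (v_knight_right : Int), Dom_joust list_field v_knight_left v_knight_right → Pre_joust list_field v_knight_left v_knight_right → Spec_joust list_field v_knight_left v_knight_right (joust list_field v_knight_left v_knight_right)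

-- ===== LEMMAS AND PROOFS =====

-- B's step count, as a function of the gap and the closing speed
def nsteps (g s : Int) : Int := if 0 < g then -(PySem.Int.floordiv (-g) s) else 0

theorem nsteps_nonpos {g s : Int} (h : g ≤ 0) : nsteps g s = 0 := by
  simp [nsteps]; omega

theorem nsteps_bracket {g s : Int} (hg : 0 < g) (hs : 0 < s) :
    (nsteps g s - 1) * s < g ∧ g ≤ nsteps g s * s := by
  have := (PySem.Int.neg_floordiv_neg_eq_iff_of_pos (a := g) (b := s)
    (q := -(PySem.Int.floordiv (-g) s)) hs).mp rfl
  simpa [nsteps, hg] using this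

theorem nsteps_step {g s : Int} (hg : 0 < g) (hs : 0 < s) :
    nsteps g s = nsteps (g - s) s + 1 := by
  obtain ⟨h1, h2⟩ := nsteps_bracket hg hs
  by_cases hg' : 0 < g - s
  · obtain ⟨h1', h2'⟩ := nsteps_bracket hg' hs
    -- both brackets pin the same integer q = q' + 1
    have e1 : (nsteps (g - s) s + 1) * s = nsteps (g - s) s * s + s := by ring
    have e2 : (nsteps (g - s) s + 1 - 1) * s = nsteps (g - s) s * s := by ring
    have hlt1 : nsteps (g - s) s < nsteps g s :=
      lt_of_mul_lt_mul_right (by linarith) hs.le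
    have hlt2 : nsteps g s - 1 < nsteps (g - s) s + 1 :=
      lt_of_mul_lt_mul_right (by linarith) hs.le
    omega
  · have hle : g - s ≤ 0 := by omega
    have hone : nsteps g s = 1 := by
      have := (PySem.Int.neg_floordiv_neg_eq_iff_of_pos (a := g) (b := s) (q := 1) hs).mpr
        ⟨by simpa using hg, by simpa using (by omega : g ≤ s)⟩
      simpa [nsteps, hg] using this
    rw [hone, nsteps_nonpos hle]
    norm_num

theorem joustLoop_eq (vl vr : Int) (hs : 0 < vl + vr) (lp rp : Int) :
    joustLoop lp rp vl vr =
      (lp + nsteps (rp - lp) (vl + vr) * vl, rp - nsteps (rp - lp) (vl + vr) * vr) := by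
  have H : ∀ (m : Nat) (lp rp : Int), (rp - lp).toNat ≤ m →
      joustLoop lp rp vl vr =
        (lp + nsteps (rp - lp) (vl + vr) * vl, rp - nsteps (rp - lp) (vl + vr) * vr) := by
    intro m
    induction m with
    | zero =>
        intro lp rp h
        have hle : rp - lp ≤ 0 := by omega
        rw [joustLoop, nsteps_nonpos hle]
        simp
        omega
    | succ m ih =>
        intro lp rp h
        rw [joustLoop]
        by_cases hlt : lp < rp
        · simp only [hlt, hs, and_self, dite_true]
          rw [ih (lp + vl) (rp - vr) (by omega)]
          have hrec : nsteps (rp - lp) (vl + vr) = nsteps (rp - vr - (lp + vl)) (vl + vr) + 1 := by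
            have := nsteps_step (g := rp - lp) (s := vl + vr) (by omega) hs
            rw [this]
            congr 1
            congr 1
            ring
          rw [hrec, Prod.mk.injEq]
          constructor <;> ring
        · simp only [hlt, false_and, dite_false]
          rw [nsteps_nonpos (by omega)]
          simp
  exact H (rp - lp).toNat lp rp le_rfl

-- A's return expression and B's `_lane` calls build the same strings (definitional)
theorem render_eq_lanes (lp rp l1 l2 : Int) :
    joustRender lp rp l1 l2 =
      [joustLane (lp - 2) ['$', '-', '>'] (l1 - lp - 1), joustLane rp ['<', '-', 'P'] (l2 - rp - 3)] := rfl

theorem joust_eq_alt (list_field : List String) (vl vr : Int)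
    (hpre : Pre_joust list_field vl vr) :
    joust list_field vl vr = joust_alt list_field vl vr := by
  by_cases h0 : vl = 0 ∧ vr = 0
  · simp [joust, joust_alt, h0]
  · rcases hpre with h | ⟨hlen, hcase⟩
    · exact absurd h h0
    · obtain ⟨s0, s1, rest, rfl⟩ : ∃ s0 s1 rest, list_field = s0 :: s1 :: rest := by
        match list_field, hlen with
        | s0 :: s1 :: rest, _ => exact ⟨s0, s1, rest, rfl⟩
      have h1 : PySem.List.pyGet? (s0 :: s1 :: rest) 1 = some s1 :=
        PySem.List.pyGet?_ofNat (s0 :: s1 :: rest) 1 (by simp)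
      simp only [joust, joust_alt, h0, if_false,
        PySem.List.pyGet?_zero_cons, h1]
      simp only [List.headD] at hcase
      rw [render_eq_lanes]
      by_cases hsp : 0 < vl + vr
      · rw [joustLoop_eq vl vr hsp]
        have hg : PySem.Str.len s0 - 3 - 2 = PySem.Str.len s0 - 5 := by ring
        simp only [hg, nsteps]
      · -- Pre_ forces the initial gap ≤ 0: the loop exits at once and B's step count is 0
        have hgle : PySem.Str.len s0 - 5 ≤ 0 := by tauto
        rw [joustLoop]
        simp only [show ¬((2 : Int) < PySem.Str.len s0 - 3 ∧ 0 < vl + vr) by omega, dite_false]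
        have h5 : ¬ (0 : Int) < PySem.Str.len s0 - 5 := by omega
        simp only [h5, if_false]
        norm_num

-- ===== VERDICT (by name: the statement is the Claim_ definition above) =====
theorem joust_spec : Claim_equal_joust := by
  intro list_field vl vr _hdom hpre
  unfold Spec_joust
  exact joust_eq_alt list_field vl vr hpre
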